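-- pv_equiv track=rewrite | github.com/yazinsai/offline-tarteel | experiments/streaming-asr/streaming_transcriber.py | _is_hallucination
-- ===== SOURCE A (Python) =====
-- def _is_hallucination(text: str) -> bool:
--     """Detect hallucinated/repetitive output from Whisper."""
--     if not text.strip():
--         return False
--     words = text.strip().split()
--     if len(words) < 3:
--         return False
--     # Check for excessive repetition (same word repeated 3+ times)
--     for i in range(len(words) - 2):
--         if words[i] == words[i + 1] == words[i + 2]:
--             return True
--     # Check for very long output from a short chunk (likely hallucination)
--     if len(words) > 30:
--         return True
--     return False
-- ===== SOURCE B (Python) =====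
-- def _is_hallucination(text: str) -> bool:
--     """Detect hallucinated/repetitive output from Whisper."""
--     words = text.strip().split()
--     if len(words) < 3:
--         return False
--     # Reduce to substring search: mark each adjacent pair as '1' (equal) or '0',
--     # then a word repeated 3+ times consecutively shows up as two consecutive '1' flags.
--     flags = ''.join('1' if a == b else '0' for a, b in zip(words, words[1:]))
--     return '11' in flags or len(words) > 30
-- ===== Notes on version B (the rewrite author's own statement) =====
-- stated objective: alternative
-- what changed: Replaces the sliding-window triple loop with a reduction to substring search: a bitstring of adjacent-equality flags is built from zip(words, words[1:]) and a triple run exists iff two consecutive 1-flags occur in it; the empty-text guard is dropped as subsumed by the len<3 guard.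
import Mathlib
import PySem

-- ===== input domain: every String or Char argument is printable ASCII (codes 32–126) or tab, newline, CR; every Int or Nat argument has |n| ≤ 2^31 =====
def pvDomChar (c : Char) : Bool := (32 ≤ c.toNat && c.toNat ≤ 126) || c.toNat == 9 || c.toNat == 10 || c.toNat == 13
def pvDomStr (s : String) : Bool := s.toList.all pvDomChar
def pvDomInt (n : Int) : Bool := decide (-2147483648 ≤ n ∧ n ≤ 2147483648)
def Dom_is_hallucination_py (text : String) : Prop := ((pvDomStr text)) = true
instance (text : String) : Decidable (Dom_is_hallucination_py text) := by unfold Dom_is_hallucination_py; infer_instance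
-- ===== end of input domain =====

-- B replaces A's sliding-window triple loop by a reduction to substring search:
-- a bitstring of adjacent-equality flags is built from zip(words, words[1:]) and
-- a triple run exists iff two consecutive 1-flags occur in it — an alternative decomposition, same cost.


-- ===== PORT A =====
-- A's for-loop 'for i in range(len(words)-2): if words[i]==words[i+1]==words[i+2]: return True'
-- as structural recursion on the index i; the indices i, i+1, i+2 are always in range, so
-- List.getD is exact here.
def aTripleScan (ws : List String) (i : Nat) : Bool :=
  if h : i < ws.length - 2 then
    if (ws.getD i "" == ws.getD (i + 1) "") && (ws.getD (i + 1) "" == ws.getD (i + 2) "") then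
      true
    else
      aTripleScan ws (i + 1)
  else
    false
termination_by ws.length - 2 - i
decreasing_by omega

def is_hallucination_py (text : String) : Bool :=
  if PySem.Str.strip text == "" then false            -- if not text.strip(): return False
  else
    let words := PySem.Str.split₀ (PySem.Str.strip text)
    if words.length < 3 then false
    else if aTripleScan words 0 then true
    else if words.length > 30 then true
    else false

-- ===== PORT B =====
-- flags = ''.join('1' if a == b else '0' for a, b in zip(words, words[1:]))
-- (zip(words, words[1:]) is List.zipWith over the list and its tail), then the pair-substring test on flags.
def is_hallucination_py_alt (text : String) : Bool :=
  let words := PySem.Str.split₀ (PySem.Str.strip text)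
  if words.length < 3 then false
  else
    let flags : List Char :=
      List.zipWith (fun a b => if a == b then '1' else '0') words words.tail
    PySem.Chars.isIn ['1', '1'] flags || decide (words.length > 30)

-- ===== PRECONDITION & SPEC =====
def Spec_is_hallucination_py (text : String) (out : Bool) : Prop := out = is_hallucination_py_alt text
instance (text : String) (out : Bool) : Decidable (Spec_is_hallucination_py text out) := by unfold Spec_is_hallucination_py; infer_instance

-- ===== CLAIM (what is proved, stated in full; the proofs are below) =====
def Claim_equal_is_hallucination_py : Prop := ∀ (text : String), Dom_is_hallucination_py text → Spec_is_hallucination_py text (is_hallucination_py text)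

-- ===== LEMMAS AND PROOFS =====

-- Specification middle-man: there are three equal consecutive words.
def hasTriple : List String → Bool
  | a :: b :: c :: t => (a == b && b == c) || hasTriple (b :: c :: t)
  | _ => false

-- Two consecutive '1' characters somewhere in a flag list.
def hasPair : List Char → Bool
  | c1 :: c2 :: t => (c1 == '1' && c2 == '1') || hasPair (c2 :: t)
  | _ => false

theorem hasTriple_short (l : List String) (h : l.length < 3) : hasTriple l = false := by
  match l, h with
  | [], _ => rfl
  | [_], _ => rfl
  | [_, _], _ => rfl

-- the two-ones pattern is an infix of l iff l has two consecutive '1' characters.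
theorem infix_pair_iff (l : List Char) : ['1', '1'] <:+: l ↔ hasPair l = true := by
  induction l with
  | nil => simp [hasPair]
  | cons c t ih =>
    rw [List.infix_cons_iff]
    constructor
    · rintro (hpre | hinf)
      · match t, hpre with
        | c2 :: t', hpre =>
          rw [List.cons_prefix_cons] at hpre
          obtain ⟨h1, hpre⟩ := hpre
          rw [List.cons_prefix_cons] at hpre
          obtain ⟨h2, -⟩ := hpre
          simp [hasPair, ← h1, ← h2]
      · have := ih.mp hinf
        match t, this with
        | c2 :: t', h => simp [hasPair, h]
    · intro h
      match t, h with
      | c2 :: t', h =>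
        simp only [hasPair, Bool.or_eq_true, Bool.and_eq_true, beq_iff_eq] at h
        rcases h with ⟨rfl, rfl⟩ | h
        · exact Or.inl (by simp)
        · exact Or.inr (ih.mpr h)

-- The flag list of a word list has an adjacent pair of ones iff the word list has a triple.
-- the flag character built from a comparison reads back as that comparison
theorem flag_eq_one (p : Prop) [Decidable p] : ((if p then '1' else '0') == '1') = decide p := by
  by_cases h : p <;> simp [h]

theorem hasPair_flags (ws : List String) :
    hasPair (List.zipWith (fun a b => if a == b then '1' else '0') ws ws.tail) = hasTriple ws := by
  match ws with
  | [] => rfl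
  | [_] => rfl
  | [_, _] => rfl
  | a :: b :: c :: t =>
    have ih := hasPair_flags (b :: c :: t)
    simp only [List.tail_cons, List.zipWith] at ih ⊢
    rw [hasPair, hasTriple, ih, flag_eq_one, flag_eq_one]
    by_cases h1 : a = b <;> by_cases h2 : b = c <;> by_cases h3 : a = c <;>
      simp [h1, h2, h3]

theorem aTripleScan_eq (ws : List String) : ∀ i, aTripleScan ws i = hasTriple (ws.drop i) := by
  intro i
  fun_induction aTripleScan ws i with
  | case1 i h htrip =>
    have h0 : i < ws.length := by omega
    have h1 : i + 1 < ws.length := by omega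
    have h2 : i + 2 < ws.length := by omega
    rw [List.drop_eq_getElem_cons h0, List.drop_eq_getElem_cons h1, List.drop_eq_getElem_cons h2]
    simp only [List.getD_eq_getElem?_getD, List.getElem?_eq_getElem, h0, h1, h2,
      Option.getD_some] at htrip
    simp [hasTriple, htrip]
  | case2 i h htrip ih =>
    have h0 : i < ws.length := by omega
    have h1 : i + 1 < ws.length := by omega
    have h2 : i + 2 < ws.length := by omega
    rw [ih]
    conv_rhs => rw [List.drop_eq_getElem_cons h0]
    rw [List.drop_eq_getElem_cons h1, List.drop_eq_getElem_cons h2]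
    simp only [List.getD_eq_getElem?_getD, List.getElem?_eq_getElem, h0, h1, h2,
      Option.getD_some] at htrip
    simp [hasTriple, htrip]
  | case3 i h =>
    rw [hasTriple_short]
    simp; omega

-- ===== VERDICT (by name: the statement is the Claim_ definition above) =====
theorem is_hallucination_py_spec : Claim_equal_is_hallucination_py := by
  intro text _
  unfold Spec_is_hallucination_py is_hallucination_py is_hallucination_py_alt
  by_cases hemp : PySem.Str.strip text == ""
  · have : PySem.Str.strip text = "" := by simpa using hemp
    rw [this]
    simp
    decide
  · simp only [hemp]
    set ws := PySem.Str.split₀ (PySem.Str.strip text) with hws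
    by_cases hlen : ws.length < 3
    · simp [hlen]
    · simp only [hlen, if_false]
      have hscan : aTripleScan ws 0 = hasTriple ws := by rw [aTripleScan_eq]; rfl
      have hflags : PySem.Chars.isIn ['1', '1']
          (List.zipWith (fun a b => if a == b then '1' else '0') ws ws.tail) = hasTriple ws := by
        rw [← hasPair_flags ws]
        cases hp : hasPair (List.zipWith (fun a b => if a == b then '1' else '0') ws ws.tail)
        · exact (PySem.Chars.isIn_eq_false_iff _ _).mpr
            (fun h => by rw [(infix_pair_iff _).mp h] at hp; cases hp)
        · exact (PySem.Chars.isIn_iff_infix _ _).mpr ((infix_pair_iff _).mpr hp)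
      rw [hscan, hflags]
      cases hasTriple ws <;> simp
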